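-- pv_equiv track=rewrite | github.com/pyDock/pyProCT | pyRMSD/symmTools.py | symm_permutations
-- ===== SOURCE A (Python) =====
-- def symm_permutations(groups):
--     if len(groups) > 0:
--         head = groups[0]
--
--         for tail_permutation in symm_permutations(groups[1:]):
--             yield [head] + tail_permutation
--
--         swapped_head = []
--         for pair in head:
--             swapped_head.append([pair[1], pair[0]])
--         for tail_permutation in symm_permutations(groups[1:]):
--             yield [swapped_head] + tail_permutation
--     else:
--         yield []
-- ===== SOURCE B (Python) =====
-- def symm_permutations(groups):
--     # Iterative: fold right-to-left, building the tail-permutation list once per level.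
--     results = [[]]
--     for g in reversed(groups):
--         swapped = [[p[1], p[0]] for p in g]
--         results = [[opt] + t for opt in (g, swapped) for t in results]
--     for r in results:
--         yield r
-- ===== Notes on version B (the rewrite author's own statement) =====
-- stated objective: alternative
-- what changed: Replaced the double-recursing generator (which rebuilds the tail permutation list twice per level) by a single iterative right-to-left fold that builds each level's permutation list once and reuses it for both the normal and swapped head.
import Mathlib
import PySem

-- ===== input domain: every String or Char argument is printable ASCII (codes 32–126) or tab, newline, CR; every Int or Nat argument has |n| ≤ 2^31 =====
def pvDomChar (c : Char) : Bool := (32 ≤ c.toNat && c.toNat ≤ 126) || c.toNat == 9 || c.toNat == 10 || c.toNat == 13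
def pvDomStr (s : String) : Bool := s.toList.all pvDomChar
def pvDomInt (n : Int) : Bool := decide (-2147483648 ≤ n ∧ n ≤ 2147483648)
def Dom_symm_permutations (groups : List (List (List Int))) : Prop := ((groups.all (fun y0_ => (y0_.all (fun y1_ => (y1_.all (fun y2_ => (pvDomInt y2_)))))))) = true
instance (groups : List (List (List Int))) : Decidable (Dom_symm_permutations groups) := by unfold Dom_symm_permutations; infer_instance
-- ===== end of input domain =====

-- B replaces A's double-recursing generator by one right-to-left fold that builds each
-- tail-permutation list once and reuses it for both head options (alternative structure).

-- ===== PORT A =====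
-- A: recursion; for a nonempty list, yield head::t for each tail permutation, then build
-- swapped_head by an append loop and yield swapped_head::t for a SECOND recursive pass.
def symm_permutations (groups : List (List (List Int))) : List (List (List (List Int))) :=
  match groups with
  | [] => [[]]
  | head :: rest =>
      (symm_permutations rest).map (fun t => head :: t)
      ++ (let swapped_head :=
            head.foldl (fun acc pair =>
              acc ++ [[PySem.List.pyGetD pair 1 0, PySem.List.pyGetD pair 0 0]]) [];
          (symm_permutations rest).map (fun t => swapped_head :: t))

-- ===== PORT B =====
-- B: iterative fold over the reversed list; each step combines the two head options
-- with the already-built tail list.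
def symm_permutations_alt (groups : List (List (List Int))) : List (List (List (List Int))) :=
  groups.reverse.foldl
    (fun results g =>
      let swapped := g.map (fun p => [PySem.List.pyGetD p 1 0, PySem.List.pyGetD p 0 0]);
      [g, swapped].flatMap (fun opt => results.map (fun t => opt :: t)))
    [[]]

-- ===== PRECONDITION & SPEC =====
-- Pre_ excludes inputs where some pair has fewer than 2 elements: there A's pair[1] (or
-- pair[0]) raises IndexError while the generator is consumed.
def Pre_symm_permutations (groups : List (List (List Int))) : Prop :=
  ∀ g ∈ groups, ∀ p ∈ g, 2 ≤ p.length
instance (groups : List (List (List Int))) : Decidable (Pre_symm_permutations groups) := by unfold Pre_symm_permutations; infer_instance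
def pvWitness_symm_permutations : List (List (List Int)) := [[[1, 2]], [[3, 4], [5, 6]]]
def Spec_symm_permutations (groups : List (List (List Int))) (out : List (List (List (List Int)))) : Prop := out = symm_permutations_alt groups
instance (groups : List (List (List Int))) (out : List (List (List (List Int)))) : Decidable (Spec_symm_permutations groups out) := by unfold Spec_symm_permutations; infer_instance

-- ===== CLAIM (what is proved, stated in full; the proofs are below) =====
def Claim_equal_symm_permutations : Prop := ∀ (groups : List (List (List Int))), Dom_symm_permutations groups → Pre_symm_permutations groups → Spec_symm_permutations groups (symm_permutations groups)

-- ===== LEMMAS AND PROOFS =====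

-- B's fold over the reversed list is a foldr; one step equals A's level (appended maps).
theorem symm_permutations_eq_alt (groups : List (List (List Int))) :
    symm_permutations groups = symm_permutations_alt groups := by
  unfold symm_permutations_alt
  rw [List.foldl_reverse]
  induction groups with
  | nil => simp [symm_permutations]
  | cons head rest ih =>
      rw [List.foldr_cons, ← ih]
      simp only [symm_permutations, PySem.List.foldl_append_singleton_eq_map,
        List.flatMap_cons, List.flatMap_nil, List.nil_append, List.append_nil]

-- ===== VERDICT (by name: the statement is the Claim_ definition above) =====
theorem symm_permutations_spec : Claim_equal_symm_permutations := by
  intro groups _ _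
  exact symm_permutations_eq_alt groups
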